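-- pv_equiv track=rewrite | github.com/Peter-Vanderhyde/Funcy | Tic_Tac_Toe3.7.py | check_all_values
-- ===== SOURCE A (Python) =====
-- def check_all_values(values):
--     not_won = False
--     #Checks for empty spaces in the column
--     for position in values:
--         if position not in [' x ',' o ']:
--             not_won = True
--     if not not_won:
--         if' x ' in values and ' o ' in values:
--             #Not all values in the column are the same
--             not_won = True
--         else:
--             #All the values are the same
--             won = True
--             return "Someone has won"
-- ===== SOURCE B (Python) =====
-- def check_all_values(values):
--     distinct = set(values)
--     if distinct <= {' x ', ' o '} and len(distinct) <= 1:
--         return "Someone has won"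
-- ===== Notes on version B (the rewrite author's own statement) =====
-- stated objective: simpler
-- what changed: Replaces A's flag-maintaining scan plus two membership re-scans by building the set of distinct marks once and testing that it is a subset of {' x ',' o '} of size at most 1.
import Mathlib
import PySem

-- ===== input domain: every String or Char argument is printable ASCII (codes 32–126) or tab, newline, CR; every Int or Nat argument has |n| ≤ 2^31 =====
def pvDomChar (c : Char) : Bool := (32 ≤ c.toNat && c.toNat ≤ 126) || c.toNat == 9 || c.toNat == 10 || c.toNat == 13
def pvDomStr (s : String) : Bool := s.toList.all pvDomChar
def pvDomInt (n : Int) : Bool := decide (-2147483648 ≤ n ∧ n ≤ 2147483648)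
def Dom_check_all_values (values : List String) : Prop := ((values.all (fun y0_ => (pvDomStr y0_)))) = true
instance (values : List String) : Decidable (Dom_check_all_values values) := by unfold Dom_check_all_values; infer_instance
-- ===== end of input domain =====

-- B replaces A's flag-maintaining scan (plus two membership re-scans) with one test on the
-- set of distinct marks: a win iff that set is a subset of {' x ',' o '} of size at most 1.
-- Objective: simpler. (Both return the win string on an empty board, as A does.)

-- ===== PORT A =====
def check_all_values (values : List String) : Option String :=
  -- not_won = False; for position in values: if position not in [' x ',' o ']: not_won = True
  let not_won := values.foldl
    (fun nw position => if !([" x ", " o "].contains position) then true else nw) false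
  if !not_won then
    if values.contains " x " && values.contains " o " then
      none          -- not_won = True; falls off the end → None
    else
      some "Someone has won"
  else none

-- ===== PORT B =====
def check_all_values_alt (values : List String) : Option String :=
  let distinct := PySem.Set.ofList values
  if distinct.issubset (PySem.Set.ofList [" x ", " o "]) && decide (PySem.Set.len distinct ≤ 1) then
    some "Someone has won"
  else none

-- ===== PRECONDITION & SPEC =====
def Spec_check_all_values (values : List String) (out : Option String) : Prop := out = check_all_values_alt values
instance (values : List String) (out : Option String) : Decidable (Spec_check_all_values values out) := by unfold Spec_check_all_values; infer_instance

-- ===== CLAIM (what is proved, stated in full; the proofs are below) =====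
def Claim_equal_check_all_values : Prop := ∀ (values : List String), Dom_check_all_values values → Spec_check_all_values values (check_all_values values)

-- ===== LEMMAS AND PROOFS =====

-- A's flag loop computes "some element is outside {' x ',' o '}"
theorem flag_loop_eq (values : List String) (b : Bool) :
    values.foldl (fun nw position => if !([" x ", " o "].contains position) then true else nw) b
      = (b || values.any (fun p => !([" x ", " o "].contains p))) := by
  induction values generalizing b with
  | nil => simp
  | cons h t ih =>
    simp only [List.foldl_cons, List.any_cons, ih]
    cases b <;> cases ([" x ", " o "].contains h) <;> simp

-- a nodup list all of whose elements equal c has at most one element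
theorem nodup_const_len {l : List String} {c : String} (hnd : l.Nodup)
    (h : ∀ x ∈ l, x = c) : l.length ≤ 1 := by
  match l with
  | [] => simp
  | [a] => simp
  | a :: b :: t =>
    exfalso
    have ha := h a (by simp)
    have hb := h b (by simp)
    have := hnd
    simp [List.nodup_cons] at this
    exact this.1.1 (ha.trans hb.symm)

theorem check_all_values_eq (values : List String) :
    check_all_values values = check_all_values_alt values := by
  unfold check_all_values check_all_values_alt
  rw [flag_loop_eq]
  have hsub : (PySem.Set.ofList values).issubset (PySem.Set.ofList [" x ", " o "]) = true
      ↔ ∀ p ∈ values, p = " x " ∨ p = " o " := by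
    rw [PySem.Set.issubset_iff]
    constructor
    · intro h p hp
      have := h p ((PySem.Set.mem_ofList values p).2 hp)
      rw [PySem.Set.mem_ofList] at this
      simpa using this
    · intro h x hx
      rw [PySem.Set.mem_ofList] at hx ⊢
      rcases h x hx with h1 | h1 <;> simp [h1]
  by_cases hall : ∀ p ∈ values, p = " x " ∨ p = " o "
  · have hany : (values.any (fun p => !([" x ", " o "].contains p))) = false := by
      simp only [List.any_eq_false, Bool.not_eq_true']
      intro p hp
      rcases hall p hp with h1 | h1 <;> simp [h1]
    have hs : (PySem.Set.ofList values).issubset (PySem.Set.ofList [" x ", " o "]) = true :=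
      hsub.2 hall
    by_cases hboth : (" x " : String) ∈ values ∧ (" o " : String) ∈ values
    · -- both marks present: A returns none; B's distinct set has at least two elements
      have h2 : 2 ≤ (PySem.Set.ofList values).length := by
        have hx : (" x " : String) ∈ PySem.Set.ofList values :=
          (PySem.Set.mem_ofList values _).2 hboth.1
        have ho : (" o " : String) ∈ PySem.Set.ofList values :=
          (PySem.Set.mem_ofList values _).2 hboth.2
        have hoe : (" o " : String) ∈ (PySem.Set.ofList values).erase " x " :=
          (List.mem_erase_of_ne (by decide)).2 ho
        have hpos : 0 < ((PySem.Set.ofList values).erase " x ").length :=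
          List.length_pos_of_mem hoe
        have := List.length_erase_of_mem hx
        omega
      have hlen : ¬ (PySem.Set.len (PySem.Set.ofList values) ≤ 1) := by
        simp only [PySem.Set.len]; omega
      have hA : (values.contains " x " && values.contains " o ") = true := by
        simp only [Bool.and_eq_true, List.contains_eq_mem, decide_eq_true_eq]; exact hboth
      have hB : ¬ (((PySem.Set.ofList values).issubset (PySem.Set.ofList [" x ", " o "]) &&
          decide ((PySem.Set.ofList values).len ≤ 1)) = true) := by
        simp only [Bool.and_eq_true, decide_eq_true_eq, not_and]; intro _; exact hlen
      simp only [hany, Bool.false_or, Bool.not_false, if_true]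
      rw [if_pos hA, if_neg hB]
    · -- at most one distinct mark: both return the win string
      have hone : (∀ x ∈ PySem.Set.ofList values, x = " x ") ∨
                  (∀ x ∈ PySem.Set.ofList values, x = " o ") := by
        rcases not_and_or.1 hboth with hnx | hno
        · right; intro x hx
          have hxm := (PySem.Set.mem_ofList values x).1 hx
          rcases hall x hxm with h1 | h1
          · exact absurd (h1 ▸ hxm) hnx
          · exact h1
        · left; intro x hx
          have hxm := (PySem.Set.mem_ofList values x).1 hx
          rcases hall x hxm with h1 | h1
          · exact h1
          · exact absurd (h1 ▸ hxm) hno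
      have hl : (PySem.Set.ofList values).length ≤ 1 := by
        rcases hone with h | h
        · exact nodup_const_len (PySem.Set.nodup_ofList values) h
        · exact nodup_const_len (PySem.Set.nodup_ofList values) h
      have hlen : PySem.Set.len (PySem.Set.ofList values) ≤ 1 := by
        simp only [PySem.Set.len]; omega
      have hA : ¬ ((values.contains " x " && values.contains " o ") = true) := by
        simp only [Bool.and_eq_true, List.contains_eq_mem, decide_eq_true_eq]; exact hboth
      have hB : ((PySem.Set.ofList values).issubset (PySem.Set.ofList [" x ", " o "]) &&
          decide ((PySem.Set.ofList values).len ≤ 1)) = true := by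
        simp only [hs, Bool.true_and, decide_eq_true_eq]; exact hlen
      simp only [hany, Bool.false_or, Bool.not_false, if_true]
      rw [if_neg hA, if_pos hB]
  · -- some element outside {' x ',' o '}: A's flag fires, B's subset test fails
    have hany : (values.any (fun p => !([" x ", " o "].contains p))) = true := by
      rcases not_forall.1 hall with ⟨p, hp⟩
      rcases Classical.not_imp.1 hp with ⟨hpm, hpx⟩
      refine List.any_eq_true.2 ⟨p, hpm, ?_⟩
      simp only [Bool.not_eq_true', List.contains_eq_mem, decide_eq_false_iff_not]
      simpa using hpx
    have hs : ¬ ((PySem.Set.ofList values).issubset (PySem.Set.ofList [" x ", " o "]) = true) := by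
      intro hc
      exact hall (hsub.1 hc)
    have hB : ¬ (((PySem.Set.ofList values).issubset (PySem.Set.ofList [" x ", " o "]) &&
        decide ((PySem.Set.ofList values).len ≤ 1)) = true) := by
      simp only [Bool.and_eq_true, not_and]; intro hc _; exact hs hc
    simp only [hany, Bool.or_true, Bool.not_true, Bool.false_eq_true, if_false]
    rw [if_neg hB]

-- ===== VERDICT (by name: the statement is the Claim_ definition above) =====
theorem check_all_values_spec : Claim_equal_check_all_values := by
  intro values _
  unfold Spec_check_all_values
  exact check_all_values_eq values
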